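-- pv_equiv track=rewrite | github.com/sohyeonhi/PWV-screening-prediction | feature_select.py | build_feature_set
-- ===== SOURCE A (Python) =====
-- from typing import List, Dict, Tuple, Optional
--
-- A_BLOCK = ['T_CHOL','TG','HDL','LDL']
--
-- B_BLOCK = ['LDL/HDL','AIP','Non_HDL']
--
-- C_BLOCK = ['extreme_TG_flag','extreme_HDL_flag','extreme_LDL_flag','extreme_TCHOL_flag']
--
-- D_BLOCK = ['SBP','DBP']                           # 항상 포함
--
-- E_BLOCK = ['extreme_SBP_flag','extreme_DBP_flag'] # 그룹 토글
--
-- F_BLOCK = ['AST','ALT','RGTP']                    # 그룹 토글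
--
-- MANDATORY_EXCLUDE = {'PWV'}                       # 입력 피처에서 제외(타깃은 PWV)
--
-- def build_feature_set(all_cols: List[str], arm: str, c_on: bool, base_toggle: Dict[str,bool]) -> List[str]:
--     cols = [c for c in all_cols if c not in MANDATORY_EXCLUDE]
--     include = set()
--     if arm == 'A':
--         include.update([c for c in A_BLOCK if c in cols])
--     elif arm == 'B':
--         include.update([c for c in B_BLOCK if c in cols])
--     else:
--         raise ValueError("arm must be 'A' or 'B'")
--     if c_on:
--         include.update([c for c in C_BLOCK if c in cols])
--     include.update([c for c in D_BLOCK if c in cols])  # D 항상 포함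
--     if base_toggle.get('E', False):
--         include.update([c for c in E_BLOCK if c in cols])
--     if base_toggle.get('F', False):
--         include.update([c for c in F_BLOCK if c in cols])
--     block_union = set(A_BLOCK)|set(B_BLOCK)|set(C_BLOCK)|set(D_BLOCK)|set(E_BLOCK)|set(F_BLOCK)|MANDATORY_EXCLUDE
--     remaining = [c for c in cols if c not in block_union]
--     include.update(remaining)
--     return sorted(include)
-- ===== SOURCE B (Python) =====
-- A_BLOCK = ['T_CHOL','TG','HDL','LDL']
-- B_BLOCK = ['LDL/HDL','AIP','Non_HDL']
-- C_BLOCK = ['extreme_TG_flag','extreme_HDL_flag','extreme_LDL_flag','extreme_TCHOL_flag']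
-- D_BLOCK = ['SBP','DBP']
-- E_BLOCK = ['extreme_SBP_flag','extreme_DBP_flag']
-- F_BLOCK = ['AST','ALT','RGTP']
--
--
-- def build_feature_set(all_cols, arm, c_on, base_toggle):
--     # Complement view: drop exactly the inactive blocks (plus the target PWV),
--     # keep everything else, in one filter pass.
--     if arm == 'A':
--         killed = set(B_BLOCK)
--     elif arm == 'B':
--         killed = set(A_BLOCK)
--     else:
--         raise ValueError("arm must be 'A' or 'B'")
--     killed.add('PWV')
--     if not c_on:
--         killed.update(C_BLOCK)
--     if not base_toggle.get('E', False):
--         killed.update(E_BLOCK)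
--     if not base_toggle.get('F', False):
--         killed.update(F_BLOCK)
--     return sorted({c for c in all_cols if c not in killed})
-- ===== Notes on version B (the rewrite author's own statement) =====
-- stated objective: alternative
-- what changed: Replaces the block-by-block union of included columns plus a leftover-columns pass by the complement view: build one 'killed' set (PWV plus the inactive blocks) and keep every other column in a single filter over all_cols.
import Mathlib
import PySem

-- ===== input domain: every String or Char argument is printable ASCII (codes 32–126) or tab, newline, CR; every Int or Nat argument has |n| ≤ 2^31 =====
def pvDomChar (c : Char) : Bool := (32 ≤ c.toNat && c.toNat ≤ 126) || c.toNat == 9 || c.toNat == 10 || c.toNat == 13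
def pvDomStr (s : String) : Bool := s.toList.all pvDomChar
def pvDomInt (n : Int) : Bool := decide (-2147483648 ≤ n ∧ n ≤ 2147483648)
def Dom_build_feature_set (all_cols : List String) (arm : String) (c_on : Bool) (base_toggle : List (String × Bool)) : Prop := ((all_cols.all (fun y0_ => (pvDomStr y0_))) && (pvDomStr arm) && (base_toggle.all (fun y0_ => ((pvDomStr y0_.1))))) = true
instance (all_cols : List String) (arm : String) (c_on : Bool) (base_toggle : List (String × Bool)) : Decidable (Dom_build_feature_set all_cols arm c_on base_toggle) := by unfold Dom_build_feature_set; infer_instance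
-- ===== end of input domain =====

-- B replaces A's union-of-included-blocks + leftover pass with one complement
-- filter against a single 'killed' set; same return value on Pre_ (alternative
-- decomposition, no speed claim).

-- module constants
def pvA_BLOCK : List String := ["T_CHOL","TG","HDL","LDL"]
def pvB_BLOCK : List String := ["LDL/HDL","AIP","Non_HDL"]
def pvC_BLOCK : List String := ["extreme_TG_flag","extreme_HDL_flag","extreme_LDL_flag","extreme_TCHOL_flag"]
def pvD_BLOCK : List String := ["SBP","DBP"]
def pvE_BLOCK : List String := ["extreme_SBP_flag","extreme_DBP_flag"]
def pvF_BLOCK : List String := ["AST","ALT","RGTP"]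
def pvMANDATORY_EXCLUDE : PySem.Set String := PySem.Set.ofList ["PWV"]

-- ===== PORT A =====
def build_feature_set (all_cols : List String) (arm : String) (c_on : Bool) (base_toggle : List (String × Bool)) : List String :=
  let cols := all_cols.filter (fun c => !(PySem.Set.contains pvMANDATORY_EXCLUDE c))
  let include0 : PySem.Set String := PySem.Set.empty
  let include1 :=
    if arm == "A" then PySem.Set.update include0 (pvA_BLOCK.filter (fun c => cols.contains c))
    else if arm == "B" then PySem.Set.update include0 (pvB_BLOCK.filter (fun c => cols.contains c))
    else include0  -- Python raises ValueError here; excluded by Pre_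
  let include2 := if c_on then PySem.Set.update include1 (pvC_BLOCK.filter (fun c => cols.contains c)) else include1
  let include3 := PySem.Set.update include2 (pvD_BLOCK.filter (fun c => cols.contains c))
  let include4 := if PySem.Dict.getD (PySem.Dict.ofList base_toggle) "E" false then PySem.Set.update include3 (pvE_BLOCK.filter (fun c => cols.contains c)) else include3
  let include5 := if PySem.Dict.getD (PySem.Dict.ofList base_toggle) "F" false then PySem.Set.update include4 (pvF_BLOCK.filter (fun c => cols.contains c)) else include4
  let block_union := PySem.Set.union (PySem.Set.union (PySem.Set.union (PySem.Set.union (PySem.Set.union (PySem.Set.union (PySem.Set.ofList pvA_BLOCK) pvB_BLOCK) pvC_BLOCK) pvD_BLOCK) pvE_BLOCK) pvF_BLOCK) pvMANDATORY_EXCLUDE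
  let remaining := cols.filter (fun c => !(PySem.Set.contains block_union c))
  let include6 := PySem.Set.update include5 remaining
  PySem.List.sorted include6 (fun x => x) false

-- ===== PORT B =====
def build_feature_set_alt (all_cols : List String) (arm : String) (c_on : Bool) (base_toggle : List (String × Bool)) : List String :=
  let killed0 : PySem.Set String :=
    if arm == "A" then PySem.Set.ofList pvB_BLOCK
    else if arm == "B" then PySem.Set.ofList pvA_BLOCK
    else PySem.Set.empty  -- Python raises ValueError here; excluded by Pre_
  let killed1 := PySem.Set.add killed0 "PWV"
  let killed2 := if !c_on then PySem.Set.update killed1 pvC_BLOCK else killed1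
  let killed3 := if !(PySem.Dict.getD (PySem.Dict.ofList base_toggle) "E" false) then PySem.Set.update killed2 pvE_BLOCK else killed2
  let killed4 := if !(PySem.Dict.getD (PySem.Dict.ofList base_toggle) "F" false) then PySem.Set.update killed3 pvF_BLOCK else killed3
  PySem.List.sorted (PySem.Set.ofList (all_cols.filter (fun c => !(PySem.Set.contains killed4 c)))) (fun x => x) false

-- ===== PRECONDITION & SPEC =====
-- Pre_ excludes exactly the inputs where A raises ValueError (arm neither 'A' nor 'B').
def Pre_build_feature_set (all_cols : List String) (arm : String) (c_on : Bool) (base_toggle : List (String × Bool)) : Prop :=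
  arm = "A" ∨ arm = "B"
instance (all_cols : List String) (arm : String) (c_on : Bool) (base_toggle : List (String × Bool)) : Decidable (Pre_build_feature_set all_cols arm c_on base_toggle) := by unfold Pre_build_feature_set; infer_instance

def pvWitness_build_feature_set : List String × String × Bool × (List (String × Bool)) :=
  (["TG", "PWV", "age", "SBP"], "A", true, [("E", true)])

def Spec_build_feature_set (all_cols : List String) (arm : String) (c_on : Bool) (base_toggle : List (String × Bool)) (out : List String) : Prop := out = build_feature_set_alt all_cols arm c_on base_toggle
instance (all_cols : List String) (arm : String) (c_on : Bool) (base_toggle : List (String × Bool)) (out : List String) : Decidable (Spec_build_feature_set all_cols arm c_on base_toggle out) := by unfold Spec_build_feature_set; infer_instance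

-- ===== CLAIM (what is proved, stated in full; the proofs are below) =====
def Claim_equal_build_feature_set : Prop := ∀ (all_cols : List String) (arm : String) (c_on : Bool) (base_toggle : List (String × Bool)), Dom_build_feature_set all_cols arm c_on base_toggle → Pre_build_feature_set all_cols arm c_on base_toggle → Spec_build_feature_set all_cols arm c_on base_toggle (build_feature_set all_cols arm c_on base_toggle)

-- ===== LEMMAS AND PROOFS =====
lemma pv_nodup_ite {c : Prop} [Decidable c] {s t : List String} (hs : s.Nodup) (ht : t.Nodup) : (if c then s else t).Nodup := by
  split <;> assumption

lemma pv_mem_ite_update' {b : Bool} (s : PySem.Set String) (l : List String) (x : String) :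
    (x ∈ (if b = false then PySem.Set.update s l else s)) ↔ (x ∈ s ∨ (b = false ∧ x ∈ l)) := by
  cases b <;> simp [PySem.Set.mem_update]

lemma pv_mem_ite_update {b : Bool} (s : PySem.Set String) (l : List String) (x : String) :
    (x ∈ (if b = true then PySem.Set.update s l else s)) ↔ (x ∈ s ∨ (b = true ∧ x ∈ l)) := by
  cases b <;> simp [PySem.Set.mem_update]

-- ===== VERDICT (by name: the statement is the Claim_ definition above) =====
set_option maxHeartbeats 1000000 in
theorem build_feature_set_spec : Claim_equal_build_feature_set := by
  intro all_cols arm c_on base_toggle _ hpre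
  unfold Spec_build_feature_set build_feature_set build_feature_set_alt
  rcases hpre with rfl | rfl <;>
  · generalize PySem.Dict.getD (PySem.Dict.ofList base_toggle) "E" false = bE
    generalize PySem.Dict.getD (PySem.Dict.ofList base_toggle) "F" false = bF
    rw [PySem.List.sorted_id_eq_sorted_id_iff_perm]
    refine (List.perm_ext_iff_of_nodup ?_ ?_).mpr ?_
    · repeat' first
        | apply pv_nodup_ite
        | apply PySem.Set.nodup_update
        | apply PySem.Set.nodup_add
        | exact PySem.Set.nodup_ofList _
        | exact List.nodup_nil
    · repeat' first
        | apply pv_nodup_ite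
        | apply PySem.Set.nodup_update
        | apply PySem.Set.nodup_add
        | exact PySem.Set.nodup_ofList _
        | exact List.nodup_nil
    intro x
    simp [pv_mem_ite_update, pv_mem_ite_update', PySem.Set.mem_update, PySem.Set.mem_add,
      PySem.Set.mem_union, PySem.Set.mem_ofList, List.mem_filter, pvMANDATORY_EXCLUDE,
      PySem.Set.empty]
    by_cases hx : x ∈ (pvA_BLOCK ++ pvB_BLOCK ++ pvC_BLOCK ++ pvD_BLOCK ++ pvE_BLOCK ++ pvF_BLOCK ++ ["PWV"])
    · simp only [pvA_BLOCK, pvB_BLOCK, pvC_BLOCK, pvD_BLOCK, pvE_BLOCK, pvF_BLOCK,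
        List.mem_append, List.mem_cons, List.not_mem_nil, or_false] at hx
      rcases hx with ((((((rfl|rfl|rfl|rfl)|rfl|rfl|rfl)|rfl|rfl|rfl|rfl)|rfl|rfl)|rfl|rfl)|rfl|rfl|rfl)|rfl <;>
        cases c_on <;> cases bE <;> cases bF <;>
        simp [pvA_BLOCK, pvB_BLOCK, pvC_BLOCK, pvD_BLOCK, pvE_BLOCK, pvF_BLOCK]
    · simp only [List.mem_append, not_or, List.mem_singleton] at hx
      obtain ⟨⟨⟨⟨⟨⟨h1,h2⟩,h3⟩,h4⟩,h5⟩,h6⟩,h7⟩ := hx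
      simp [h1, h2, h3, h4, h5, h6, h7]
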